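-- pv_equiv track=rewrite | github.com/lucas46villani/finance | app.py | contar_rachas_negativas
-- ===== SOURCE A (Python) =====
-- def contar_rachas_negativas(serie):
--     contador = 0
--     rachas = []
--
--     for valor in serie:
--         if valor < 0:
--             contador += 1
--         else:
--             if contador > 0:
--                 rachas.append(contador)
--                 contador = 0
--
--     # por si la serie termina en negativo
--     if contador > 0:
--         rachas.append(contador)
--     return rachas
-- ===== SOURCE B (Python) =====
-- def contar_rachas_negativas(serie):
--     # Two-pointer scan: skip non-negatives, then measure each negative run in one inner sweep.
--     rachas = []
--     n = len(serie)
--     i = 0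
--     while i < n:
--         if serie[i] < 0:
--             j = i
--             while j < n and serie[j] < 0:
--                 j += 1
--             rachas.append(j - i)
--             i = j
--         else:
--             i += 1
--     return rachas
-- ===== Notes on version B (the rewrite author's own statement) =====
-- stated objective: alternative
-- what changed: Replaced the counter-and-flush accumulator loop by a two-pointer scan that skips non-negatives and measures each negative run with an inner sweep, appending run lengths directly.
import Mathlib
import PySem

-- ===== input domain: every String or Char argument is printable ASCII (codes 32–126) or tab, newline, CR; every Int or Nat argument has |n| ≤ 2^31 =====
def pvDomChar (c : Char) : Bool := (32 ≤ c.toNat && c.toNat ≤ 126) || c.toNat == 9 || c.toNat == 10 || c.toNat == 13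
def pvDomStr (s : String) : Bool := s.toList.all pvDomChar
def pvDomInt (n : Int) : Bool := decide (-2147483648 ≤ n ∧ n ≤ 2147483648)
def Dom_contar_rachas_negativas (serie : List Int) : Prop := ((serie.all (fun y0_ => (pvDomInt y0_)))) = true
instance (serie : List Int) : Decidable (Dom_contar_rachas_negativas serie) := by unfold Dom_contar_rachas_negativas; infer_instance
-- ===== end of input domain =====

-- B is an alternative two-pointer/run-measuring scan (same O(n) cost); equivalence of return values is proved.

-- ===== PORT A =====
-- counter-and-flush loop over the elements, final flush after the loop
def contar_rachas_negativas (serie : List Int) : List Int :=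
  let s := serie.foldl
    (fun (st : Int × List Int) valor =>
      if valor < 0 then (st.1 + 1, st.2)
      else if st.1 > 0 then (0, st.2 ++ [st.1]) else st)
    (0, [])
  if s.1 > 0 then s.2 ++ [s.1] else s.2

-- ===== PORT B =====
-- two-pointer scan: skip a non-negative head, or measure the whole negative run and continue after it
def pvAltGo (l : List Int) : List Int :=
  match l with
  | [] => []
  | v :: rest =>
    if v < 0 then
      (((rest.takeWhile (fun x => x < 0)).length : Int) + 1) :: pvAltGo (rest.dropWhile (fun x => x < 0))
    else pvAltGo rest
termination_by l.length
decreasing_by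
  · simpa using Nat.lt_succ_of_le (List.length_dropWhile_le _ _)
  · simp

def contar_rachas_negativas_alt (serie : List Int) : List Int := pvAltGo serie

-- ===== PRECONDITION & SPEC =====
def Spec_contar_rachas_negativas (serie : List Int) (out : List Int) : Prop := out = contar_rachas_negativas_alt serie
instance (serie : List Int) (out : List Int) : Decidable (Spec_contar_rachas_negativas serie out) := by unfold Spec_contar_rachas_negativas; infer_instance

-- ===== CLAIM (what is proved, stated in full; the proofs are below) =====
def Claim_equal_contar_rachas_negativas : Prop := ∀ (serie : List Int), Dom_contar_rachas_negativas serie → Spec_contar_rachas_negativas serie (contar_rachas_negativas serie)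

-- ===== LEMMAS AND PROOFS =====

-- proof-only names for A's loop body and final flush
def pvStep (st : Int × List Int) (valor : Int) : Int × List Int :=
  if valor < 0 then (st.1 + 1, st.2) else if st.1 > 0 then (0, st.2 ++ [st.1]) else st

def pvFin (s : Int × List Int) : List Int := if s.1 > 0 then s.2 ++ [s.1] else s.2

-- proof-only description of A's loop from a pending counter c
def pvH (c : Int) (l : List Int) : List Int :=
  match l with
  | [] => if c > 0 then [c] else []
  | v :: xs => if v < 0 then pvH (c + 1) xs else (if c > 0 then [c] else []) ++ pvH 0 xs

lemma pvA_loop (xs : List Int) : ∀ (c : Int) (acc : List Int), 0 ≤ c →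
    pvFin (xs.foldl pvStep (c, acc)) = acc ++ pvH c xs := by
  induction xs with
  | nil =>
    intro c acc _
    by_cases h : c > 0 <;> simp [pvFin, pvH, h]
  | cons v xs ih =>
    intro c acc hc
    simp only [List.foldl_cons, pvStep, pvH]
    by_cases h1 : v < 0
    · simp only [if_pos h1]
      exact ih (c + 1) acc (by omega)
    · simp only [if_neg h1]
      by_cases h2 : c > 0
      · simp only [if_pos h2]
        rw [ih 0 (acc ++ [c]) le_rfl]
        simp
      · simp only [if_neg h2]
        have hc0 : c = 0 := by omega
        subst hc0
        simpa using ih 0 acc le_rfl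

lemma pvH_go (xs : List Int) :
    pvH 0 xs = pvAltGo xs ∧
    ∀ c : Int, 0 < c →
      pvH c xs = (c + ((xs.takeWhile (fun x => x < 0)).length : Int)) ::
        pvAltGo (xs.dropWhile (fun x => x < 0)) := by
  induction xs with
  | nil =>
    refine ⟨by simp [pvH, pvAltGo], fun c hc => by simp [pvH, pvAltGo, hc]⟩
  | cons v xs ih =>
    constructor
    · simp only [pvH, pvAltGo]
      by_cases h : v < 0
      · simp only [if_pos h, zero_add]
        rw [ih.2 1 one_pos]
        simp [add_comm]
      · simp only [if_neg h]
        simpa using ih.1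
    · intro c hc
      simp only [pvH, List.takeWhile_cons, List.dropWhile_cons]
      by_cases h : v < 0
      · simp only [if_pos h, decide_eq_true h, if_true]
        rw [ih.2 (c + 1) (by omega)]
        congr 1
        simp only [List.length_cons]
        push_cast
        ring
      · have hd : decide (v < 0) = false := by simp [h]
        simp [h, hc, ih.1, pvAltGo]

-- ===== VERDICT (by name: the statement is the Claim_ definition above) =====
theorem contar_rachas_negativas_spec : Claim_equal_contar_rachas_negativas := by
  intro serie _
  show contar_rachas_negativas serie = contar_rachas_negativas_alt serie
  show pvFin (serie.foldl pvStep (0, [])) = pvAltGo serie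
  rw [pvA_loop serie 0 [] le_rfl]
  simpa using (pvH_go serie).1
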